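-- pv_equiv track=rewrite | github.com/TsukinowaRin/multi-agent-shognate | scripts/shogun_to_karo_bridge.py | upgrade_legacy_state
-- ===== SOURCE A (Python) =====
-- def command_identity(cmd: dict) -> str:
--     cmd_id = str(cmd.get("id", "")).strip()
--     timestamp = str(cmd.get("timestamp", "")).strip()
--     if not cmd_id:
--         return ""
--     return f"{cmd_id}\t{timestamp}" if timestamp else cmd_id
--
-- def upgrade_legacy_state(state, cmds):
--     unique_identity_by_id = {}
--     duplicates = set()
--
--     for cmd in cmds:
--         identity = command_identity(cmd)
--         if not identity:
--             continue
--         cmd_id = str(cmd.get("id", "")).strip()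
--         if cmd_id in unique_identity_by_id:
--             duplicates.add(cmd_id)
--             continue
--         unique_identity_by_id[cmd_id] = identity
--
--     for cmd_id in duplicates:
--         unique_identity_by_id.pop(cmd_id, None)
--
--     upgraded = set()
--     for entry in state:
--         if "\t" in entry:
--             upgraded.add(entry)
--             continue
--         upgraded.add(unique_identity_by_id.get(entry, entry))
--     return upgraded
-- ===== SOURCE B (Python) =====
-- def upgrade_legacy_state(state, cmds):
--     # Map-free re-implementation: instead of building a dedup dictionary,
--     # each state entry is resolved by scanning cmds for commands whose
--     # stripped id equals the entry; exactly one match -> its identity.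
--     def resolve(entry):
--         if "\t" in entry or not entry:
--             return entry
--         matches = [c for c in cmds if str(c.get("id", "")).strip() == entry]
--         if len(matches) != 1:
--             return entry
--         ts = str(matches[0].get("timestamp", "")).strip()
--         return f"{entry}\t{ts}" if ts else entry
--     return {resolve(e) for e in state}
-- ===== Notes on version B (the rewrite author's own statement) =====
-- stated objective: alternative
-- what changed: B builds no dictionary and no duplicates set at all: each state entry is resolved independently by scanning cmds for the commands whose stripped id equals the entry, using the match only when it is unique — a per-query search replacing A's precomputed dedup map (and recomputing the identity from the single matching command instead of storing it).
import Mathlib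
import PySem

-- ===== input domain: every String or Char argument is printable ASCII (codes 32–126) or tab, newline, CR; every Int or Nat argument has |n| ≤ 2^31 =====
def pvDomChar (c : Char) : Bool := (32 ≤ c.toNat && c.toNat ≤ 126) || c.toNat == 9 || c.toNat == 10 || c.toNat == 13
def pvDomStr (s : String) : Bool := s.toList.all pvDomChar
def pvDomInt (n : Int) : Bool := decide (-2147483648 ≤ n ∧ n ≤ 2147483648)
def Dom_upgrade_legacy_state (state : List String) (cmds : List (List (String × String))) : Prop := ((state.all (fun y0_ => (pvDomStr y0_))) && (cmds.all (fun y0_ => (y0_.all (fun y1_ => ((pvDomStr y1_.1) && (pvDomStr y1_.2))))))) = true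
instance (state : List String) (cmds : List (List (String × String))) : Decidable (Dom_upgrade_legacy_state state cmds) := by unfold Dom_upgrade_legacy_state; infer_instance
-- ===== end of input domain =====

-- B builds no dictionary at all: each state entry is resolved by scanning cmds for the commands whose
-- stripped id equals it (exactly one match -> its identity); an alternative per-query-search decomposition,
-- O(n*m) instead of A's O(n+m). Return value only (a Python set, compared as a set).

-- ===== PORT A =====
def command_identity (cmd : List (String × String)) : String :=
  let cmd_id := PySem.Str.strip ((PySem.Dict.mk cmd).getD "id" "")
  let timestamp := PySem.Str.strip ((PySem.Dict.mk cmd).getD "timestamp" "")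
  if cmd_id = "" then ""
  else if timestamp ≠ "" then cmd_id ++ "\t" ++ timestamp else cmd_id

-- A's loop body over cmds: (unique_identity_by_id, duplicates)
def pvStepA (p : PySem.Dict String String × PySem.Set String) (cmd : List (String × String)) :
    PySem.Dict String String × PySem.Set String :=
  let identity := command_identity cmd
  if identity = "" then p
  else
    let cmd_id := PySem.Str.strip ((PySem.Dict.mk cmd).getD "id" "")
    if p.1.contains cmd_id then (p.1, PySem.Set.add p.2 cmd_id)
    else (p.1.insert cmd_id identity, p.2)

def upgrade_legacy_state (state : List String) (cmds : List (List (String × String))) : List String :=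
  let p := cmds.foldl pvStepA (PySem.Dict.empty, PySem.Set.empty)
  -- for cmd_id in duplicates: pop(cmd_id, None)  (dict only looked up afterwards, so set order is immaterial)
  let uid := p.2.foldl (fun d cmd_id => d.erase cmd_id) p.1
  state.foldl
    (fun upgraded entry =>
      if PySem.Str.isIn "\t" entry then PySem.Set.add upgraded entry
      else PySem.Set.add upgraded (uid.getD entry entry))
    PySem.Set.empty

-- ===== PORT B =====
-- B's per-entry resolver: scan cmds for commands whose stripped id equals the entry
def pvResolve (cmds : List (List (String × String))) (entry : String) : String :=
  if PySem.Str.isIn "\t" entry || entry == "" then entry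
  else
    -- matches = [c for c in cmds if str(c.get("id","")).strip() == entry]; used only when len == 1
    match cmds.filter (fun c => PySem.Str.strip ((PySem.Dict.mk c).getD "id" "") == entry) with
    | [c] =>
      let ts := PySem.Str.strip ((PySem.Dict.mk c).getD "timestamp" "")
      if ts ≠ "" then entry ++ "\t" ++ ts else entry
    | _ => entry

def upgrade_legacy_state_alt (state : List String) (cmds : List (List (String × String))) : List String :=
  state.foldl (fun upgraded e => PySem.Set.add upgraded (pvResolve cmds e)) PySem.Set.empty

-- ===== PRECONDITION & SPEC =====
def Spec_upgrade_legacy_state (state : List String) (cmds : List (List (String × String))) (out : List String) : Prop := out = upgrade_legacy_state_alt state cmds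
instance (state : List String) (cmds : List (List (String × String))) (out : List String) : Decidable (Spec_upgrade_legacy_state state cmds out) := by unfold Spec_upgrade_legacy_state; infer_instance

-- ===== CLAIM (what is proved, stated in full; the proofs are below) =====
def Claim_equal_upgrade_legacy_state : Prop := ∀ (state : List String) (cmds : List (List (String × String))), Dom_upgrade_legacy_state state cmds → Spec_upgrade_legacy_state state cmds (upgrade_legacy_state state cmds)

-- ===== LEMMAS AND PROOFS =====

def pvIdOf (c : List (String × String)) : String :=
  PySem.Str.strip ((PySem.Dict.mk c).getD "id" "")

-- invariant relating A's accumulator at key x to the commands with id x seen so far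
def pvInv (x : String) (ms : List (List (String × String)))
    (a : PySem.Dict String String × PySem.Set String) : Prop :=
  a.1.get? x = ms.head?.map command_identity ∧ (x ∈ a.2 ↔ 2 ≤ ms.length)

theorem pv_append_tab_ne_empty (a b : String) : a ++ "\t" ++ b ≠ "" := by
  intro hh
  have := congrArg String.toList hh
  simp at this

theorem pv_identity_empty_iff (cmd : List (String × String)) :
    command_identity cmd = "" ↔ pvIdOf cmd = "" := by
  unfold command_identity pvIdOf
  by_cases h : PySem.Str.strip ((PySem.Dict.mk cmd).getD "id" "") = ""
  · simp [h]
  · rw [if_neg h]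
    constructor
    · intro hh
      by_cases ht : PySem.Str.strip ((PySem.Dict.mk cmd).getD "timestamp" "") ≠ ""
      · rw [if_pos ht] at hh; exact absurd hh (pv_append_tab_ne_empty _ _)
      · rw [if_neg ht] at hh; exact hh
    · intro hh; exact absurd hh h

theorem pv_identity_of_ne (cmd : List (String × String)) (h : pvIdOf cmd ≠ "") :
    command_identity cmd =
      (if PySem.Str.strip ((PySem.Dict.mk cmd).getD "timestamp" "") ≠ "" then
        pvIdOf cmd ++ "\t" ++ PySem.Str.strip ((PySem.Dict.mk cmd).getD "timestamp" "")
      else pvIdOf cmd) := by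
  unfold command_identity pvIdOf at *
  simp [h]

theorem pv_get?_eq_none_iff (d : PySem.Dict String String) (x : String) :
    d.get? x = none ↔ d.contains x = false := by
  simp [PySem.Dict.get?, PySem.Dict.contains, List.find?_eq_none]

theorem pv_stepA_eq (a : PySem.Dict String String × PySem.Set String)
    (c : List (String × String)) (hid : command_identity c ≠ "") :
    pvStepA a c = (if a.1.contains (pvIdOf c) = true then (a.1, PySem.Set.add a.2 (pvIdOf c))
      else (a.1.insert (pvIdOf c) (command_identity c), a.2)) := by
  simp only [pvStepA, pvIdOf]
  rw [if_neg hid]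

theorem pv_step_inv (x : String) (hx : x ≠ "") (ms : List (List (String × String)))
    (a : PySem.Dict String String × PySem.Set String) (c : List (String × String))
    (h : pvInv x ms a) :
    pvInv x (ms ++ if pvIdOf c = x then [c] else []) (pvStepA a c) := by
  obtain ⟨h1, h2⟩ := h
  by_cases hid : command_identity c = ""
  · have hne : pvIdOf c ≠ x := by
      rw [(pv_identity_empty_iff c).mp hid]; exact fun hh => hx hh.symm
    simpa [pvStepA, hid, hne] using ⟨h1, h2⟩
  · rw [pv_stepA_eq a c hid]
    by_cases hcx : pvIdOf c = x
    · subst hcx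
      rw [if_pos rfl]
      by_cases hcont : a.1.contains (pvIdOf c) = true
      · have hms : ms ≠ [] := by
          intro hh
          rw [hh] at h1
          simp at h1
          rw [(pv_get?_eq_none_iff _ _).mp h1] at hcont
          exact Bool.false_ne_true hcont
        have hlen : 1 ≤ ms.length := List.length_pos_iff.mpr hms
        rw [if_pos hcont]
        refine ⟨?_, ?_⟩
        · simpa [List.head?_append_of_ne_nil _ hms] using h1
        · rw [PySem.Set.mem_add]
          simp only [List.length_append, List.length_cons, List.length_nil]
          constructor
          · intro _; omega
          · intro _; simp
      · have hcontf : a.1.contains (pvIdOf c) = false := by simpa using hcont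
        rw [if_neg hcont]
        have hms : ms = [] := by
          have := (pv_get?_eq_none_iff a.1 (pvIdOf c)).mpr hcontf
          rw [this] at h1
          cases ms with
          | nil => rfl
          | cons _ _ => simp at h1
        subst hms
        refine ⟨?_, ?_⟩
        · simp
        · simpa using h2
    · -- a different id: key x untouched
      have hxne : x ≠ pvIdOf c := fun hh => hcx hh.symm
      rw [if_neg hcx, List.append_nil]
      by_cases hcont : a.1.contains (pvIdOf c) = true
      · rw [if_pos hcont]
        refine ⟨h1, ?_⟩
        rw [PySem.Set.mem_add]
        constructor
        · rintro (hm | hm)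
          · exact h2.mp hm
          · exact absurd hm hxne
        · intro hm; exact Or.inl (h2.mpr hm)
      · rw [if_neg hcont]
        refine ⟨?_, h2⟩
        rw [PySem.Dict.get?_insert, if_neg hxne]
        exact h1

theorem pv_fold_inv (x : String) (hx : x ≠ "") (l : List (List (String × String)))
    (ms : List (List (String × String))) (a : PySem.Dict String String × PySem.Set String)
    (h : pvInv x ms a) :
    pvInv x (ms ++ l.filter (fun c => pvIdOf c == x)) (l.foldl pvStepA a) := by
  induction l generalizing ms a with
  | nil => simpa using h
  | cons c t ih =>
    have hstep := pv_step_inv x hx ms a c h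
    have := ih (ms ++ if pvIdOf c = x then [c] else []) (pvStepA a c) hstep
    simp only [List.foldl_cons, List.filter_cons]
    by_cases hc : pvIdOf c = x
    · simpa [hc, List.append_assoc] using this
    · simpa [hc] using this

theorem pv_get?_erase (d : PySem.Dict String String) (k x : String) :
    (d.erase k).get? x = if x = k then none else d.get? x := by
  obtain ⟨items⟩ := d
  induction items with
  | nil => simp [PySem.Dict.erase, PySem.Dict.get?]
  | cons hd tl ih =>
    by_cases hk : hd.1 = k <;> by_cases hx : hd.1 = x <;>
      simp_all [PySem.Dict.erase, PySem.Dict.get?]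

theorem pv_get?_eraseFold (ks : List String) (d : PySem.Dict String String) (x : String) :
    (ks.foldl (fun d k => d.erase k) d).get? x = if x ∈ ks then none else d.get? x := by
  induction ks generalizing d with
  | nil => simp
  | cons k t ih =>
    simp only [List.foldl_cons, ih]
    by_cases h1 : x ∈ t <;> by_cases h2 : x = k <;> simp_all [pv_get?_erase]

-- key "" is never inserted by A's loop
theorem pv_get?_empty_key (l : List (List (String × String)))
    (a : PySem.Dict String String × PySem.Set String) (h : a.1.get? "" = none) :
    (l.foldl pvStepA a).1.get? "" = none := by
  induction l generalizing a with
  | nil => exact h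
  | cons c t ih =>
    refine ih (pvStepA a c) ?_
    by_cases hid : command_identity c = ""
    · simpa [pvStepA, hid] using h
    · have hcne : pvIdOf c ≠ "" := fun hh => hid ((pv_identity_empty_iff c).mpr hh)
      unfold pvStepA
      rw [if_neg hid]
      by_cases hcont : a.1.contains (PySem.Str.strip ((PySem.Dict.mk c).getD "id" "")) = true
      · simpa [hcont] using h
      · simp only [hcont]
        rw [if_neg (by simp), PySem.Dict.get?_insert, if_neg (by intro hh; exact hcne hh.symm)]
        exact h

-- the value A adds for a state entry equals B's pvResolve
theorem pv_entry_eq (cmds : List (List (String × String))) (entry : String) :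
    (if PySem.Str.isIn "\t" entry then entry
     else ((cmds.foldl pvStepA (PySem.Dict.empty, PySem.Set.empty)).2.foldl
        (fun d cmd_id => d.erase cmd_id)
        (cmds.foldl pvStepA (PySem.Dict.empty, PySem.Set.empty)).1).getD entry entry)
    = pvResolve cmds entry := by
  by_cases htab : PySem.Str.isIn "\t" entry = true
  · rw [if_pos htab]
    unfold pvResolve
    rw [show (PySem.Str.isIn "\t" entry || entry == "") = true by rw [htab]; rfl,
        if_pos rfl]
  · have htab' : PySem.Str.isIn "\t" entry = false := by simpa using htab
    rw [if_neg htab, PySem.Dict.getD_eq_get?_getD, pv_get?_eraseFold]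
    by_cases hemp : entry = ""
    · subst hemp
      have h0 : (cmds.foldl pvStepA (PySem.Dict.empty, PySem.Set.empty)).1.get? "" = none :=
        pv_get?_empty_key cmds _ rfl
      unfold pvResolve
      rw [show (PySem.Str.isIn "\t" "" || "" == "") = true from rfl, if_pos rfl, h0]
      split <;> rfl
    · have hcond : (PySem.Str.isIn "\t" entry || entry == "") = false := by
        rw [htab']; simp [hemp]
      obtain ⟨h1, h2⟩ := pv_fold_inv entry hemp cmds [] (PySem.Dict.empty, PySem.Set.empty)
        ⟨rfl, by simp [PySem.Set.empty]⟩
      simp only [List.nil_append] at h1 h2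
      have hfe : cmds.filter (fun c => PySem.Str.strip ((PySem.Dict.mk c).getD "id" "") == entry)
          = cmds.filter (fun c => pvIdOf c == entry) := rfl
      unfold pvResolve
      rw [hcond, hfe]
      by_cases hdup : entry ∈ (cmds.foldl pvStepA (PySem.Dict.empty, PySem.Set.empty)).2
      · have hlen : 2 ≤ (cmds.filter (fun c => pvIdOf c == entry)).length := h2.mp hdup
        rw [if_pos hdup, if_neg Bool.false_ne_true]
        cases hfl : cmds.filter (fun c => pvIdOf c == entry) with
        | nil => rfl
        | cons c tl =>
          cases tl with
          | nil => rw [hfl] at hlen; simp at hlen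
          | cons c' tl' => rfl
      · rw [if_neg hdup, if_neg Bool.false_ne_true]
        have hnlen : ¬ 2 ≤ (cmds.filter (fun c => pvIdOf c == entry)).length :=
          fun hh => hdup (h2.mpr hh)
        cases hfl : cmds.filter (fun c => pvIdOf c == entry) with
        | nil =>
          rw [hfl] at h1
          rw [h1]
          rfl
        | cons c tl =>
          rw [hfl] at h1 hnlen
          have htl : tl = [] := by
            rcases tl with _ | ⟨c', tl'⟩
            · rfl
            · exact absurd (by simp only [List.length_cons]; omega) hnlen
          subst htl
          rw [h1]
          have hcid : pvIdOf c = entry := by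
            have hcmem : c ∈ cmds.filter (fun c => pvIdOf c == entry) := by rw [hfl]; simp
            simpa using List.of_mem_filter hcmem
          simp only [List.head?_cons, Option.map_some, Option.getD_some]
          rw [pv_identity_of_ne c (by rw [hcid]; exact hemp), hcid]

theorem pv_state_fold (cmds : List (List (String × String))) (st : List String)
    (s : PySem.Set String) :
    st.foldl
      (fun upgraded entry =>
        if PySem.Str.isIn "\t" entry then PySem.Set.add upgraded entry
        else PySem.Set.add upgraded
          (((cmds.foldl pvStepA (PySem.Dict.empty, PySem.Set.empty)).2.foldl
              (fun d cmd_id => d.erase cmd_id)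
              (cmds.foldl pvStepA (PySem.Dict.empty, PySem.Set.empty)).1).getD entry entry)) s
    = st.foldl (fun upgraded e => PySem.Set.add upgraded (pvResolve cmds e)) s := by
  induction st generalizing s with
  | nil => rfl
  | cons e t ih =>
    simp only [List.foldl_cons]
    rw [show (if PySem.Str.isIn "\t" e then PySem.Set.add s e
        else PySem.Set.add s
          (((cmds.foldl pvStepA (PySem.Dict.empty, PySem.Set.empty)).2.foldl
              (fun d cmd_id => d.erase cmd_id)
              (cmds.foldl pvStepA (PySem.Dict.empty, PySem.Set.empty)).1).getD e e))
      = PySem.Set.add s (pvResolve cmds e) by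
        rw [← pv_entry_eq cmds e]
        split <;> rfl]
    exact ih _

-- ===== VERDICT (by name: the statement is the Claim_ definition above) =====
theorem upgrade_legacy_state_spec : Claim_equal_upgrade_legacy_state := by
  intro state cmds _
  unfold Spec_upgrade_legacy_state upgrade_legacy_state upgrade_legacy_state_alt
  exact pv_state_fold cmds state PySem.Set.empty
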